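-- pv_equiv track=rewrite | github.com/JaViLuMa/Advent-Of-Code-2015 | 15/15.py | getHighestScore
-- ===== SOURCE A (Python) =====
-- def getHighestScore(ingredients, perms, containsCalories=False):
--     maxScore = 0
--
--     for perm in perms:
--         capacity, durability, flavor, texture, calories = 0, 0, 0, 0, 0
--
--         for index, ingredient in enumerate(ingredients):
--             capacity += ingredients[ingredient]['capacity'] * perm[index]
--             durability += ingredients[ingredient]['durability'] * perm[index]
--             flavor += ingredients[ingredient]['flavor'] * perm[index]
--             texture += ingredients[ingredient]['texture'] * perm[index]
--             calories += ingredients[ingredient]['calories'] * perm[index]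
--
--         if capacity < 0 or durability < 0 or flavor < 0 or texture < 0:
--             continue
--
--         if containsCalories and calories != 500:
--             continue
--
--         score = capacity * durability * flavor * texture
--
--         maxScore = max(score, maxScore)
--
--     return maxScore
-- ===== SOURCE B (Python) =====
-- def getHighestScore(ingredients, perms, containsCalories=False):
--     # Loop interchange: accumulate a totals table for ALL perms at once,
--     # one ingredient at a time, then scan the table for the best valid score.
--     totals = [(0, 0, 0, 0, 0) for _ in perms]
--     for index, name in enumerate(ingredients):
--         row = ingredients[name]
--         c, d, f, t, k = (row['capacity'], row['durability'],
--                          row['flavor'], row['texture'], row['calories'])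
--         totals = [(tc + c * p[index], td + d * p[index], tf + f * p[index],
--                    tt + t * p[index], tk + k * p[index])
--                   for (tc, td, tf, tt, tk), p in zip(totals, perms)]
--     best = 0
--     for c, d, f, t, k in totals:
--         if c >= 0 and d >= 0 and f >= 0 and t >= 0 and (not containsCalories or k == 500):
--             best = max(best, c * d * f * t)
--     return best
-- ===== Notes on version B (the rewrite author's own statement) =====
-- stated objective: alternative
-- what changed: A loops over perms and, per perm, runs an inner loop over ingredients accumulating five named totals and a running max; B interchanges the loops: it maintains a table of five-tuples of totals for ALL perms simultaneously, updated one ingredient at a time (columnwise), and then does a final scan over the finished table filtering and maximizing.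
-- outside the precondition, e.g. on getHighestScore({'a': {}}, [], False): A returns 0, B raises KeyError
import Mathlib
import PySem

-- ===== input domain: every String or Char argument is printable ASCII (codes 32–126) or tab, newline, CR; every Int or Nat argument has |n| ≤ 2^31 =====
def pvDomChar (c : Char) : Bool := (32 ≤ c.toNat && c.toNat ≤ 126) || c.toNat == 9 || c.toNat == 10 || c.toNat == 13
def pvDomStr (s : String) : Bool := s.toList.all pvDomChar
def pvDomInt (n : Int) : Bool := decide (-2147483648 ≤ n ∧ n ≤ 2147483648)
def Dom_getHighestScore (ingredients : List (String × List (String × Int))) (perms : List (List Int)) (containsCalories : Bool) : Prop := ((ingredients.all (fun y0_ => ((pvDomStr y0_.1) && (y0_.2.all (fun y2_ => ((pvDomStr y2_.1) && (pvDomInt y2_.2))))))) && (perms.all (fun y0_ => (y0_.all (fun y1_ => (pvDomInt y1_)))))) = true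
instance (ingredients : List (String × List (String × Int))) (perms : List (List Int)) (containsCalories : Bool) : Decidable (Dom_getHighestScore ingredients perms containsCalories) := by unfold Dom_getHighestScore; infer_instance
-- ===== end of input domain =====

-- B interchanges A's loops: instead of per-perm accumulation of five totals with a running max,
-- it maintains a table of five-tuples for ALL perms, updated one ingredient at a time, then scans
-- the finished table (alternative decomposition, same cost).


-- ===== PORT A =====
-- A's inner loop: five running totals over the enumerated ingredients for one perm.
-- The .getD fallbacks are unreachable under Pre_ (missing key = KeyError, short perm = IndexError).
def pvIngSums (d : PySem.Dict String (List (String × Int))) (perm : List Int) : Int × Int × Int × Int × Int :=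
  (PySem.List.enumerate d.keys).foldl
    (fun (st : Int × Int × Int × Int × Int) p =>
      let ing := PySem.Dict.mk ((d.get? p.2).getD [])
      let amt := (PySem.List.pyGet? perm p.1).getD 0
      (st.1 + (ing.get? "capacity").getD 0 * amt,
       st.2.1 + (ing.get? "durability").getD 0 * amt,
       st.2.2.1 + (ing.get? "flavor").getD 0 * amt,
       st.2.2.2.1 + (ing.get? "texture").getD 0 * amt,
       st.2.2.2.2 + (ing.get? "calories").getD 0 * amt))
    ((0 : Int), (0 : Int), (0 : Int), (0 : Int), (0 : Int))

def getHighestScore (ingredients : List (String × List (String × Int))) (perms : List (List Int)) (containsCalories : Bool) : Int :=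
  let d := PySem.Dict.mk ingredients
  perms.foldl (fun maxScore perm =>
    let st := pvIngSums d perm
    if st.1 < 0 ∨ st.2.1 < 0 ∨ st.2.2.1 < 0 ∨ st.2.2.2.1 < 0 then maxScore
    else if containsCalories = true ∧ st.2.2.2.2 ≠ 500 then maxScore
    else max (st.1 * st.2.1 * st.2.2.1 * st.2.2.2.1) maxScore)
  0

-- ===== PORT B =====
-- one ingredient's columnwise update of the whole totals table (Source B's list comprehension over zip)
def pvColStep (d : PySem.Dict String (List (String × Int))) (perms : List (List Int))
    (p : Int × String) (totals : List (Int × Int × Int × Int × Int)) : List (Int × Int × Int × Int × Int) :=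
  let row := PySem.Dict.mk ((d.get? p.2).getD [])
  let c := (row.get? "capacity").getD 0
  let du := (row.get? "durability").getD 0
  let f := (row.get? "flavor").getD 0
  let t := (row.get? "texture").getD 0
  let k := (row.get? "calories").getD 0
  (totals.zip perms).map (fun q =>
    let amt := (PySem.List.pyGet? q.2 p.1).getD 0
    (q.1.1 + c * amt, q.1.2.1 + du * amt, q.1.2.2.1 + f * amt,
     q.1.2.2.2.1 + t * amt, q.1.2.2.2.2 + k * amt))

def getHighestScore_alt (ingredients : List (String × List (String × Int))) (perms : List (List Int)) (containsCalories : Bool) : Int :=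
  let d := PySem.Dict.mk ingredients
  let totals := (PySem.List.enumerate d.keys).foldl
    (fun totals p => pvColStep d perms p totals)
    (perms.map (fun _ => ((0 : Int), (0 : Int), (0 : Int), (0 : Int), (0 : Int))))
  totals.foldl (fun best st =>
    if 0 ≤ st.1 ∧ 0 ≤ st.2.1 ∧ 0 ≤ st.2.2.1 ∧ 0 ≤ st.2.2.2.1 ∧ (containsCalories = false ∨ st.2.2.2.2 = 500)
    then max best (st.1 * st.2.1 * st.2.2.1 * st.2.2.2.1) else best)
  0

-- ===== PRECONDITION & SPEC =====
-- Pre_ excludes exactly: (a) inputs where a property dict misses one of the five keys or a perm is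
-- shorter than the ingredient list — there A raises (KeyError / IndexError) whenever a perm reaches
-- the lookup, and when no perm does (e.g. perms == []) A accidentally returns 0 while B's eager
-- per-ingredient key lookups still raise KeyError; and (b) association lists with duplicate
-- ingredient names or duplicate property keys, which a Python dict cannot represent.
def Pre_getHighestScore (ingredients : List (String × List (String × Int))) (perms : List (List Int)) (containsCalories : Bool) : Prop :=
  (ingredients.map Prod.fst).Nodup ∧
  (∀ p ∈ ingredients, (p.2.map Prod.fst).Nodup ∧
     ∀ k ∈ (["capacity", "durability", "flavor", "texture", "calories"] : List String), k ∈ p.2.map Prod.fst) ∧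
  ∀ perm ∈ perms, ingredients.length ≤ perm.length

instance (ingredients : List (String × List (String × Int))) (perms : List (List Int)) (containsCalories : Bool) : Decidable (Pre_getHighestScore ingredients perms containsCalories) := by unfold Pre_getHighestScore; infer_instance

def pvWitness_getHighestScore : (List (String × List (String × Int))) × List (List Int) × Bool :=
  ([("a", [("capacity", 1), ("durability", 1), ("flavor", 2), ("texture", 1), ("calories", 500)])], [[1], [3]], false)

def Spec_getHighestScore (ingredients : List (String × List (String × Int))) (perms : List (List Int)) (containsCalories : Bool) (out : Int) : Prop := out = getHighestScore_alt ingredients perms containsCalories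
instance (ingredients : List (String × List (String × Int))) (perms : List (List Int)) (containsCalories : Bool) (out : Int) : Decidable (Spec_getHighestScore ingredients perms containsCalories out) := by unfold Spec_getHighestScore; infer_instance

-- ===== CLAIM (what is proved, stated in full; the proofs are below) =====
def Claim_equal_getHighestScore : Prop := ∀ (ingredients : List (String × List (String × Int))) (perms : List (List Int)) (containsCalories : Bool), Dom_getHighestScore ingredients perms containsCalories → Pre_getHighestScore ingredients perms containsCalories → Spec_getHighestScore ingredients perms containsCalories (getHighestScore ingredients perms containsCalories)

-- ===== LEMMAS AND PROOFS =====

-- the common per-ingredient, per-perm state update (proof-only name for both ports' step)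
def pvH (d : PySem.Dict String (List (String × Int))) (p : Int × String)
    (st : Int × Int × Int × Int × Int) (perm : List Int) : Int × Int × Int × Int × Int :=
  let ing := PySem.Dict.mk ((d.get? p.2).getD [])
  let amt := (PySem.List.pyGet? perm p.1).getD 0
  (st.1 + (ing.get? "capacity").getD 0 * amt,
   st.2.1 + (ing.get? "durability").getD 0 * amt,
   st.2.2.1 + (ing.get? "flavor").getD 0 * amt,
   st.2.2.2.1 + (ing.get? "texture").getD 0 * amt,
   st.2.2.2.2 + (ing.get? "calories").getD 0 * amt)

lemma pv_zip_map {γ β δ : Type} (f : γ → β → δ) :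
    ∀ (ts : List γ) (ps : List β), (ts.zip ps).map (fun q => f q.1 q.2) = List.zipWith f ts ps := by
  intro ts
  induction ts with
  | nil => intro ps; simp
  | cons t ts ih => intro ps; cases ps <;> simp [ih]

lemma pvColStep_eq (d : PySem.Dict String (List (String × Int))) (perms : List (List Int))
    (p : Int × String) (totals : List (Int × Int × Int × Int × Int)) :
    pvColStep d perms p totals = List.zipWith (fun t q => pvH d p t q) totals perms := by
  show (totals.zip perms).map (fun q => pvH d p q.1 q.2) = _
  exact pv_zip_map (fun t q => pvH d p t q) totals perms

lemma pvIngSums_eq (d : PySem.Dict String (List (String × Int))) (perm : List Int) :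
    pvIngSums d perm
      = (PySem.List.enumerate d.keys).foldl (fun st p => pvH d p st perm)
          ((0 : Int), (0 : Int), (0 : Int), (0 : Int), (0 : Int)) := rfl

lemma pv_zipWith_fst {γ β : Type} :
    ∀ (ts : List γ) (ps : List β), ts.length = ps.length →
      List.zipWith (fun t _ => t) ts ps = ts := by
  intro ts
  induction ts with
  | nil => intro ps _; simp
  | cons t ts ih =>
    intro ps h
    cases ps with
    | nil => simp at h
    | cons p ps => simp [ih ps (by simpa using h)]

lemma pv_zipWith_zipWith_same {γ β : Type} (f g : γ → β → γ) :
    ∀ (ts : List γ) (ps : List β),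
      List.zipWith f (List.zipWith g ts ps) ps = List.zipWith (fun t p => f (g t p) p) ts ps := by
  intro ts
  induction ts with
  | nil => intro ps; simp
  | cons t ts ih => intro ps; cases ps <;> simp [ih]

-- loop interchange: folding columnwise updates over xs equals, pointwise per perm, folding the
-- per-perm update over xs
lemma pv_transpose {α γ β : Type} (h : α → γ → β → γ) :
    ∀ (xs : List α) (ts : List γ) (ps : List β), ts.length = ps.length →
      xs.foldl (fun ts x => List.zipWith (fun t p => h x t p) ts ps) ts
        = List.zipWith (fun t p => xs.foldl (fun s x => h x s p) t) ts ps := by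
  intro xs
  induction xs with
  | nil => intro ts ps hl; simpa using (pv_zipWith_fst ts ps hl).symm
  | cons x xs ih =>
    intro ts ps hl
    simp only [List.foldl_cons]
    rw [ih _ ps (by simp [List.length_zipWith, hl]), pv_zipWith_zipWith_same]

lemma pv_zipWith_map_const {γ β δ : Type} (z : γ) (F : γ → β → δ) :
    ∀ (ps : List β), List.zipWith F (ps.map (fun _ => z)) ps = ps.map (fun p => F z p) := by
  intro ps
  induction ps with
  | nil => rfl
  | cons p ps ih => simp only [List.map_cons, List.zipWith_cons_cons, ih]

-- the two guard shapes agree pointwise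
lemma pv_guard_eq (cc : Bool) (m : Int) (st : Int × Int × Int × Int × Int) :
    (if st.1 < 0 ∨ st.2.1 < 0 ∨ st.2.2.1 < 0 ∨ st.2.2.2.1 < 0 then m
     else if cc = true ∧ st.2.2.2.2 ≠ 500 then m
     else max (st.1 * st.2.1 * st.2.2.1 * st.2.2.2.1) m)
    = (if 0 ≤ st.1 ∧ 0 ≤ st.2.1 ∧ 0 ≤ st.2.2.1 ∧ 0 ≤ st.2.2.2.1 ∧ (cc = false ∨ st.2.2.2.2 = 500)
       then max m (st.1 * st.2.1 * st.2.2.1 * st.2.2.2.1) else m) := by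
  split_ifs with h1 h2 h3 h4 h5 <;>
    first
      | rfl
      | (exact max_comm _ _)
      | (exfalso; cases cc <;> simp_all <;> omega)

-- ===== VERDICT (by name: the statement is the Claim_ definition above) =====
theorem getHighestScore_spec : Claim_equal_getHighestScore := by
  intro ingredients perms containsCalories _hdom _hpre
  unfold Spec_getHighestScore
  simp only [getHighestScore, getHighestScore_alt]
  set d := PySem.Dict.mk ingredients with hd
  -- B's totals table equals the per-perm map of A's inner sums
  have htot : (PySem.List.enumerate d.keys).foldl
      (fun totals p => pvColStep d perms p totals)
      (perms.map (fun _ => ((0 : Int), (0 : Int), (0 : Int), (0 : Int), (0 : Int))))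
      = perms.map (fun perm => pvIngSums d perm) := by
    have hstep : (fun (totals : List (Int × Int × Int × Int × Int)) (p : Int × String) =>
        pvColStep d perms p totals)
        = fun totals p => List.zipWith (fun t q => pvH d p t q) totals perms := by
      funext totals p; exact pvColStep_eq d perms p totals
    rw [hstep,
      pv_transpose (pvH d) (PySem.List.enumerate d.keys) _ perms (by simp),
      pv_zipWith_map_const]
    apply List.map_congr_left
    intro perm _
    exact (pvIngSums_eq d perm).symm
  rw [htot, List.foldl_map]
  apply PySem.List.foldl_congr_mem
  intro m perm _
  exact pv_guard_eq containsCalories m (pvIngSums d perm)
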